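/-
  INTERFACE CHECK for the guard `s < n'` of the two pointer fields of `imdct_step3_inner_s_loop.Loop` (the farm's CONTRACT-POST
  problem of freeze-7, unit imdct_step3_inner_s_loop.2).

      the body ends with      0x1062ab `movsxd rax, r15d` ; `shl rax, 2` ; 0x1062b2 `sub rbp, rax` ; 0x1062b5 `sub rbx, rax`
                              (`ee0 -= k0; ee2 -= k0;`, C lines 2576–2577) — also in the LAST iteration
      the precondition        bounds `k0 (n' − 1)` (`Mdct.StrideDown.lo`), not `k0 n'`
      so for `s = n'`         rbp / rbx hold `ee − 4 k0 n'` modulo 2⁶⁴, possibly wrapped; they are dead (the epilogue pops them)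

  1. the precondition's arithmetic allows the wrap (the worker's counter-ghosts);  2. whenever another iteration follows there is
  no wrap (what segment 2 proves the guarded fields with);  3. `AtBody` gives the two equations without a guard (what segments 2's
  walk starts from);  4. the three sibling loops need no guard: their step is a constant and the precondition bounds one step more.
-/
import Vorbis.Spec.Mdct
namespace Vorbis.Spec.SLoopGuardTest
open X86 X86.User Asan Vorbis Vorbis.Spec

/-- 1. LEGAL GHOSTS WITH A WRAP: `n' = 1`, `s = 0`, `k0 = 2³⁰` (only `k0 < 2³¹` is known when `n' = 1`), `koff = 1`, `i0 = 8`, a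
buffer of `len = 9` floats at `e = 119D40H`: `StrideDown` holds, the buffer ends below `C00000H`, and `4 k0 (s + 1) + 4 koff`
exceeds `e + 4 i0` — the unguarded `ee2` for `s + 1` would be false. -/
example :
    Mdct.StrideDown 9 8 1 (2 ^ 30) 1 ∧ 2 ^ 30 < 2 ^ 31 ∧ 0x119d40 + 4 * 9 ≤ 0xC00000 ∧
      ¬ (4 * (2 ^ 30 * (0 + 1)) + 4 * 1 ≤ 0x119d40 + 4 * 8) := by
  refine ⟨⟨by decide, by decide⟩, ?_⟩
  decide

/-- 2. NO WRAP WHILE AN ITERATION IS STILL TO COME: `s + 1 < n'` puts `k0 (s + 1)` under `StrideDown.lo`. -/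
example {len i0 koff k0 n s e : Nat} (h : Mdct.StrideDown len i0 koff k0 n) (hs : s + 1 < n) :
    4 * (k0 * (s + 1)) + 4 * koff ≤ e + 4 * i0 := by
  have h1 := h.lo
  have h2 : k0 * (s + 1) ≤ k0 * (n - 1) := Nat.mul_le_mul_left k0 (by omega)
  omega

/-- 3. AT THE FIRST INSTRUCTION OF THE BODY the two pointer equations hold without a guard: `AtBody` carries `s < n'`. -/
example {u₀ : State} {others : List Obj} {frames : List (Nat × FrameLayout)} {len i0 koff k0 aoff : Nat} {ue : State}
    {ret : Word} {s : Nat} {v : State}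
    (h : imdct_step3_inner_s_loop.AtBody u₀ others frames len i0 koff k0 aoff ue ret s v) :
    (v.reg .rbp).toNat + 4 * (k0 * s) = (ue.reg .rsi).toNat + 4 * i0 ∧
      (v.reg .rbx).toNat + 4 * (k0 * s) + 4 * koff = (ue.reg .rsi).toNat + 4 * i0 :=
  ⟨h.2.1.ee0 h.2.2, h.2.1.ee2 h.2.2⟩

/-- 4a. imdct_step3_iter0_loop / imdct_step3_inner_r_loop (step 32 bytes): `PairDown.lo` bounds `koff + 8 m`, so the lower pointer
after ALL `m` iterations is at least `e − 4` — not below 0 for a live buffer (`4 ≤ e`). -/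
example {len i0 koff m e : Nat} (h : Mdct.PairDown len i0 koff (8 * m)) (he : 4 ≤ e) :
    32 * m + 4 * koff ≤ e + 4 * i0 := by
  have h1 := h.lo
  omega

/-- 4b. imdct_step3_inner_s_loop_ld654 (step 64 bytes): the precondition's `16 n' ≤ i0 + 1` likewise. -/
example {i0 n e : Nat} (h : 16 * n ≤ i0 + 1) (he : 4 ≤ e) : 64 * n ≤ e + 4 * i0 := by
  omega

end Vorbis.Spec.SLoopGuardTest
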